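-- pv_equiv track=rewrite | github.com/Perilynn/HackerRank-Coding-Challenges | Strings/Fraud Detection/Modi.py | fix_email
-- ===== SOURCE A (Python) =====
-- def fix_email(email):
--     if ("+" in email):
--         app = True
--         nemail = ""
--         for lett in email:
--             if (lett == "+"): app = False
--             if (lett == "@"): app = True
--             if (app): nemail += lett
--         email = nemail
--     email = email.replace(".","")
--     return email
-- ===== SOURCE B (Python) =====
-- def fix_email(email):
--     parts = [part.split('+')[0] for part in email.split('@')]
--     return '@'.join(parts).replace('.', '')
-- ===== Notes on version B (the rewrite author's own statement) =====
-- stated objective: idiomatic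
-- what changed: Replaces A's character-by-character enable/disable state machine (with a '+' membership guard) by an unconditional split on '@', truncation of each segment at its first '+', rejoin with '@', then dot removal.
import Mathlib
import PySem

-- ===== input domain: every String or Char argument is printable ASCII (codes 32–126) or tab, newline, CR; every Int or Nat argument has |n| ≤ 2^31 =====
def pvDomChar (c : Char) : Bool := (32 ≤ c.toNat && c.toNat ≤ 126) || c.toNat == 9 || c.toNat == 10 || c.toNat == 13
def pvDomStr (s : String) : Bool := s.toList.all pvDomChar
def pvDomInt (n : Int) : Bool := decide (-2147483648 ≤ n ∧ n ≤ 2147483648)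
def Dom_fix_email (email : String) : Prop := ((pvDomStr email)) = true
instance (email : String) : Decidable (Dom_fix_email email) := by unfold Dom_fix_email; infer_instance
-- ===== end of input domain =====

-- B replaces A's per-character enable/disable state machine by split-on-'@' / truncate-at-'+' / rejoin (idiomatic, same cost).

-- ===== PORT A =====
-- the body of A's for-loop: thread (app, nemail) through the characters
def fixLoop (st : Bool × List Char) (lett : Char) : Bool × List Char :=
  let app := if lett == '+' then false else st.1
  let app := if lett == '@' then true else app
  (app, if app then st.2 ++ [lett] else st.2)

def fix_email (email : String) : String :=
  let email :=
    if PySem.Str.isIn "+" email then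
      String.ofList (email.toList.foldl fixLoop (true, [])).2
    else email
  PySem.Str.replace email "." ""

-- ===== PORT B =====
-- part.split('+')[0]  (split with a non-empty separator never yields an empty list)
def truncSeg (part : List Char) : List Char := (PySem.Chars.splitOn part ['+']).headD []

def fix_email_alt (email : String) : String :=
  PySem.Str.replace
    (String.ofList (PySem.Chars.join ['@']
      ((PySem.Chars.splitOn email.toList ['@']).map truncSeg)))
    "." ""

-- ===== PRECONDITION & SPEC =====
def Spec_fix_email (email : String) (out : String) : Prop := out = fix_email_alt email
instance (email : String) (out : String) : Decidable (Spec_fix_email email out) := by unfold Spec_fix_email; infer_instance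

-- ===== CLAIM (what is proved, stated in full; the proofs are below) =====
def Claim_equal_fix_email : Prop := ∀ (email : String), Dom_fix_email email → Spec_fix_email email (fix_email email)

-- ===== LEMMAS AND PROOFS =====

-- truncate a segment at its first '+'
def trunc (l : List Char) : List Char := l.takeWhile (· != '+')

-- A's loop as a structural recursion
def loopA (app : Bool) : List Char → List Char
  | [] => []
  | c :: cs =>
    let app1 := if c == '+' then false else app
    let app2 := if c == '@' then true else app1
    (if app2 then [c] else []) ++ loopA app2 cs

theorem foldl_fixLoop (cs : List Char) : ∀ (app : Bool) (acc : List Char),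
    (cs.foldl fixLoop (app, acc)).2 = acc ++ loopA app cs := by
  induction cs with
  | nil => intro app acc; simp [loopA]
  | cons c cs ih =>
    intro app acc
    simp only [List.foldl_cons, fixLoop, loopA]
    by_cases h1 : c == '+' <;> by_cases h2 : c == '@' <;>
      simp [h1, h2, ih] <;> cases app <;> simp

theorem splitOn_go_single (c : Char) : ∀ (l : List Char) (fuel : Nat) (cur : List Char) (acc : List (List Char)),
    l.length < fuel →
    PySem.Chars.splitOn.go [c] fuel l cur acc
      = acc.reverse ++ (l.splitOn c).modifyHead (cur.reverse ++ ·) := by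
  intro l
  induction l with
  | nil =>
    intro fuel cur acc h
    cases fuel with
    | zero => omega
    | succ fuel =>
      rw [PySem.Chars.splitOn.go.eq_def]
      simp [List.splitOn, List.splitOnP_nil]
  | cons a t ih =>
    intro fuel cur acc h
    cases fuel with
    | zero => omega
    | succ fuel =>
      by_cases hac : a = c
      · subst hac
        have hpre : List.isPrefixOf [a] (a :: t) = true := by
          simp [List.isPrefixOf]
        rw [PySem.Chars.splitOn.go.eq_def]
        simp only [hpre, if_true, List.length_cons, List.length_nil,
          List.drop_succ_cons, List.drop_zero]
        rw [ih fuel [] (cur.reverse :: acc) (by simpa using Nat.lt_of_succ_lt_succ h)]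
        simp only [List.splitOn, List.splitOnP_cons, beq_self_eq_true, if_true,
          List.reverse_cons, List.reverse_nil, List.nil_append, List.modifyHead]
        cases hq : List.splitOnP (fun x => x == a) t <;> simp
      · have hpre : List.isPrefixOf [c] (a :: t) = false := by
          simp [List.isPrefixOf]
          intro hh; exact absurd hh.symm hac
        rw [PySem.Chars.splitOn.go.eq_def]
        simp only [hpre, if_false, Bool.false_eq_true]
        rw [ih fuel (a :: cur) acc (by simpa using Nat.lt_of_succ_lt_succ h)]
        have hne : t.splitOn c ≠ [] := List.splitOnP_ne_nil _ t
        obtain ⟨h0, rest, hsp⟩ := List.exists_cons_of_ne_nil hne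
        have hbeq : (a == c) = false := beq_eq_false_iff_ne.mpr hac
        have hsp' : List.splitOnP (· == c) t = h0 :: rest := by
          simpa [List.splitOn] using hsp
        simp [List.splitOn, List.splitOnP_cons, hbeq, hsp']

theorem charsSplitOn_single (c : Char) (l : List Char) :
    PySem.Chars.splitOn l [c] = l.splitOn c := by
  rw [PySem.Chars.splitOn]
  rw [splitOn_go_single c l (l.length + 1) [] [] (by omega)]
  have hne : l.splitOn c ≠ [] := List.splitOnP_ne_nil _ l
  obtain ⟨h0, rest, hsp⟩ := List.exists_cons_of_ne_nil hne
  simp [hsp]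

theorem replace_go_single (c : Char) : ∀ (l : List Char) (fuel : Nat) (acc : List Char),
    l.length ≤ fuel →
    PySem.Chars.replace.go [c] [] fuel l acc = acc.reverse ++ l.filter (· != c) := by
  intro l
  induction l with
  | nil =>
    intro fuel acc h
    cases fuel with
    | zero => simp [PySem.Chars.replace.go.eq_def]
    | succ fuel => simp [PySem.Chars.replace.go.eq_def]
  | cons a t ih =>
    intro fuel acc h
    cases fuel with
    | zero => simp at h
    | succ fuel =>
      by_cases hac : a = c
      · subst hac
        have hpre : List.isPrefixOf [a] (a :: t) = true := by simp [List.isPrefixOf]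
        rw [PySem.Chars.replace.go.eq_def]
        simp only [hpre, if_true, List.length_singleton, List.drop_succ_cons,
          List.drop_zero, List.reverse_nil, List.nil_append]
        rw [ih fuel acc (by simpa using Nat.le_of_succ_le_succ h)]
        simp
      · have hpre : List.isPrefixOf [c] (a :: t) = false := by
          simp [List.isPrefixOf]
          intro hh; exact absurd hh.symm hac
        rw [PySem.Chars.replace.go.eq_def]
        simp only [hpre, if_false, Bool.false_eq_true]
        rw [ih fuel (a :: acc) (by simpa using Nat.le_of_succ_le_succ h)]
        have hbeq : (a != c) = true := by simp [hac]
        simp [hbeq]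

theorem charsReplace_single (c : Char) (l : List Char) :
    PySem.Chars.replace l [c] [] = l.filter (· != c) := by
  rw [PySem.Chars.replace]
  simp only [List.isEmpty_cons, if_false, Bool.false_eq_true]
  exact replace_go_single c l l.length [] (le_refl _)

-- part.split('+')[0] is the prefix before the first '+'
theorem truncSeg_eq (l : List Char) : truncSeg l = trunc l := by
  rw [truncSeg, charsSplitOn_single, trunc]
  induction l with
  | nil => simp [List.splitOn, List.splitOnP_nil]
  | cons a t ih =>
    by_cases hac : a = '+'
    · subst hac
      simp [List.splitOn, List.splitOnP_cons]
    · have hbeq : (a == '+') = false := beq_eq_false_iff_ne.mpr hac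
      have hne : t.splitOn '+' ≠ [] := List.splitOnP_ne_nil _ t
      obtain ⟨h0, rest, hsp⟩ := List.exists_cons_of_ne_nil hne
      have hsp' : List.splitOnP (· == '+') t = h0 :: rest := by
        simpa [List.splitOn] using hsp
      have ih' : h0 = t.takeWhile (· != '+') := by
        simpa [List.splitOn, hsp'] using ih
      simp [List.splitOn, List.splitOnP_cons, hbeq, hsp', ih', hac]

-- join ['@'] pulls a leading character out of the first part
theorem join_cons_head (x : Char) (p : List Char) (t : List (List Char)) :
    PySem.Chars.join ['@'] ((x :: p) :: t) = x :: PySem.Chars.join ['@'] (p :: t) := by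
  cases t with
  | nil => simp [PySem.Chars.join_singleton]
  | cons q t => simp [PySem.Chars.join_cons_cons]

-- the heart of the equivalence: A's state machine computes the '@'-join of the truncated segments
theorem loopA_eq (cs : List Char) : ∀ (app : Bool),
    loopA app cs = PySem.Chars.join ['@']
      ((if app then trunc (cs.splitOn '@').headI else [])
        :: ((cs.splitOn '@').tail.map trunc)) := by
  induction cs with
  | nil =>
    intro app
    cases app <;>
      simp [loopA, List.splitOn, List.splitOnP_nil, trunc, PySem.Chars.join_singleton]
  | cons c cs ih =>
    intro app
    have hne : cs.splitOn '@' ≠ [] := List.splitOnP_ne_nil _ cs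
    obtain ⟨h0, rest, hsp⟩ := List.exists_cons_of_ne_nil hne
    by_cases h2 : c = '@'
    · subst h2
      have d1 : ('@' == '+') = false := by decide
      have d2 : ('@' == '@') = true := by decide
      have hsp2 : ('@' :: cs).splitOn '@' = [] :: cs.splitOn '@' := by
        simp [List.splitOn, List.splitOnP_cons]
      simp only [loopA, d1, d2, if_true, if_false, Bool.false_eq_true, List.singleton_append]
      rw [ih true, hsp2, hsp]
      cases app <;>
        simp [trunc, PySem.Chars.join_cons_cons]
    · by_cases h1 : c = '+'
      · subst h1
        have d1 : ('+' == '+') = true := by decide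
        have d2 : ('+' == '@') = false := by decide
        have hsp' : List.splitOnP (· == '@') cs = h0 :: rest := by
          simpa [List.splitOn] using hsp
        have hsp2 : ('+' :: cs).splitOn '@' = ('+' :: h0) :: rest := by
          simp [List.splitOn, List.splitOnP_cons, d2, hsp']
        simp only [loopA, d1, d2, if_true, if_false, Bool.false_eq_true, List.nil_append]
        rw [ih false, hsp, hsp2]
        cases app <;> simp [trunc]
      · have e1 : (c == '+') = false := beq_eq_false_iff_ne.mpr h1
        have e2 : (c == '@') = false := beq_eq_false_iff_ne.mpr h2
        have hsp' : List.splitOnP (· == '@') cs = h0 :: rest := by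
          simpa [List.splitOn] using hsp
        have hsp2 : (c :: cs).splitOn '@' = (c :: h0) :: rest := by
          simp [List.splitOn, List.splitOnP_cons, e2, hsp']
        simp only [loopA, e1, e2, if_false, Bool.false_eq_true]
        rw [ih app, hsp, hsp2]
        cases app <;>
          simp [trunc, h1, join_cons_head]

-- with no '+' anywhere, A's loop is the identity
theorem loopA_true_of_no_plus (cs : List Char) (h : '+' ∉ cs) : loopA true cs = cs := by
  induction cs with
  | nil => rfl
  | cons c cs ih =>
    have hc : (c == '+') = false := beq_eq_false_iff_ne.mpr (by rintro rfl; exact h (by simp))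
    have hmem : '+' ∉ cs := fun hm => h (by simp [hm])
    by_cases h2 : c = '@' <;> simp [loopA, hc, h2, ih hmem]

-- B's chars-level value equals A's loop started enabled
theorem joined_eq_loopA (cs : List Char) :
    PySem.Chars.join ['@'] ((PySem.Chars.splitOn cs ['@']).map truncSeg) = loopA true cs := by
  rw [charsSplitOn_single, loopA_eq cs true]
  have hne : cs.splitOn '@' ≠ [] := List.splitOnP_ne_nil _ cs
  obtain ⟨h0, rest, hsp⟩ := List.exists_cons_of_ne_nil hne
  have ht : truncSeg = trunc := funext truncSeg_eq
  simp [hsp, ht]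

-- ===== VERDICT (by name: the statement is the Claim_ definition above) =====
theorem fix_email_spec : Claim_equal_fix_email := by
  intro email _
  unfold Spec_fix_email fix_email fix_email_alt
  have hrepl : ∀ s : String, PySem.Str.replace s "." ""
      = String.ofList (s.toList.filter (· != '.')) := by
    intro s
    rw [PySem.Str.replace]
    congr 1
    exact charsReplace_single '.' s.toList
  by_cases h : PySem.Str.isIn "+" email
  · simp only [h, if_true, hrepl, String.toList_ofList]
    congr 1
    rw [joined_eq_loopA, foldl_fixLoop email.toList true []]
    simp
  · simp only [h, if_false, Bool.false_eq_true, hrepl, String.toList_ofList]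
    have hnp : '+' ∉ email.toList := by
      intro hm
      apply h
      rw [PySem.Str.isIn_iff_infix]
      obtain ⟨u, v, huv⟩ := List.append_of_mem hm
      exact ⟨u, v, by simp [huv]⟩
    congr 2
    rw [joined_eq_loopA, loopA_true_of_no_plus _ hnp]
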